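-- pv_equiv track=rewrite | github.com/ereinha/SYMBA | data-preprocessing/2022-09-15-QCD-DataPreparation/scripts/DataPreparation_parallel.py | get_unique_indices
-- ===== SOURCE A (Python) =====
-- def get_unique_indices(l):
--     seen = set([0])
--     res = []
--     for i, n in enumerate(l):
--         if n not in seen:
--             res.append(i)
--             seen.add(n)
--     return res
-- ===== SOURCE B (Python) =====
-- def get_unique_indices(l):
--     unique = list(dict.fromkeys(l))
--     return [l.index(v) for v in unique if v != 0]
-- ===== Notes on version B (the rewrite author's own statement) =====
-- stated objective: alternative
-- what changed: Replaces A's single streaming pass with a seeded seen-set by a dedup-then-locate pair of passes: first-occurrence-ordered unique values via dict.fromkeys, then l.index for each nonzero unique value.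
import Mathlib
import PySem

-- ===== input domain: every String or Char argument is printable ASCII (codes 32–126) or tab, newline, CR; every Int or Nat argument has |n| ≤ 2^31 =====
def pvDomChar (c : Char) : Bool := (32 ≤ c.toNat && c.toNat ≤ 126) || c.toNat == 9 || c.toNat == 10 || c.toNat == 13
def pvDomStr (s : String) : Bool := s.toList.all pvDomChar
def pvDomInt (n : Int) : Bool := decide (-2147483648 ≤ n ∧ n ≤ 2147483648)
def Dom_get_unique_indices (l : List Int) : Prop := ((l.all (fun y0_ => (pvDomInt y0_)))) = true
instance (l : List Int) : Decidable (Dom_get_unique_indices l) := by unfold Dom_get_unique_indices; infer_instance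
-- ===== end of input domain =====

-- B replaces A's single seeded-seen-set pass by dedup-then-locate (dict.fromkeys then l.index); same return value, no speed claim.

-- ===== PORT A =====
def get_unique_indices (l : List Int) : List Int :=
  ((PySem.List.enumerate l 0).foldl
    (fun (st : PySem.Set Int × List Int) p =>
      if PySem.Set.contains st.1 p.2 then st
      else (PySem.Set.add st.1 p.2, st.2 ++ [p.1]))
    (PySem.Set.ofList [0], [])).2

-- ===== PORT B =====
-- l.index(v) never raises here (v ∈ dedup l ⊆ l), so index? is always some; getD 0 is never the default
def get_unique_indices_alt (l : List Int) : List Int :=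
  ((PySem.List.dedup l).filter (fun v => v != 0)).map
    (fun v => (((PySem.List.index? l v).getD 0 : Nat) : Int))

-- ===== PRECONDITION & SPEC =====
def Spec_get_unique_indices (l : List Int) (out : List Int) : Prop := out = get_unique_indices_alt l
instance (l : List Int) (out : List Int) : Decidable (Spec_get_unique_indices l out) := by unfold Spec_get_unique_indices; infer_instance

-- ===== CLAIM (what is proved, stated in full; the proofs are below) =====
def Claim_equal_get_unique_indices : Prop := ∀ (l : List Int), Dom_get_unique_indices l → Spec_get_unique_indices l (get_unique_indices l)

-- ===== LEMMAS AND PROOFS =====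

-- (index, value) pairs of first occurrences of values not in `seen`, indices counted from k
def pvNews (seen : List Int) (k : Int) : List Int → List (Int × Int)
  | [] => []
  | x :: xs => if x ∈ seen then pvNews seen (k+1) xs else (k, x) :: pvNews (x :: seen) (k+1) xs

theorem pvNews_congr (s t : List Int) (k : Int) (xs : List Int)
    (h : ∀ y, y ∈ s ↔ y ∈ t) : pvNews s k xs = pvNews t k xs := by
  induction xs generalizing s t k with
  | nil => rfl
  | cons x xs ih =>
    simp only [pvNews]
    by_cases hx : x ∈ s
    · rw [if_pos hx, if_pos ((h x).mp hx)]; exact ih s t (k+1) h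
    · rw [if_neg hx, if_neg (fun hm => hx ((h x).mpr hm))]
      refine congrArg _ (ih (x :: s) (x :: t) (k+1) ?_)
      intro y; simp [h y]

theorem pvA_loop (xs : List Int) (k : Int) (s : PySem.Set Int) (res : List Int) :
    ((PySem.List.enumerate xs k).foldl
      (fun (st : PySem.Set Int × List Int) p =>
        if PySem.Set.contains st.1 p.2 then st
        else (PySem.Set.add st.1 p.2, st.2 ++ [p.1]))
      (s, res)).2 = res ++ (pvNews s k xs).map Prod.fst := by
  induction xs generalizing k s res with
  | nil => simp [PySem.List.enumerate_nil, pvNews]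
  | cons x xs ih =>
    rw [PySem.List.enumerate_cons]
    simp only [List.foldl_cons, pvNews]
    by_cases hx : x ∈ s
    · rw [if_pos (by simpa using hx), if_pos hx, ih]
    · rw [if_neg (by simp [hx]), if_neg hx, ih]
      rw [pvNews_congr (PySem.Set.add s x) (x :: s) (k+1) xs
        (by intro y; simp [PySem.Set.mem_add]; tauto)]
      simp

theorem pvB_dedup (xs : List Int) (s : PySem.Set Int) (k : Int) :
    xs.foldl PySem.Set.add s = s ++ (pvNews s k xs).map Prod.snd := by
  induction xs generalizing s k with
  | nil => simp [pvNews]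
  | cons x xs ih =>
    simp only [List.foldl_cons, pvNews]
    by_cases hx : x ∈ s
    · rw [if_pos hx, PySem.Set.add_of_mem hx, ih (k := k+1)]
    · rw [if_neg hx, PySem.Set.add_of_not_mem hx, ih (k := k+1)]
      rw [pvNews_congr (s ++ [x]) (x :: s) (k+1) xs (by intro y; simp; tauto)]
      simp

theorem pvNews_filter (xs : List Int) (s : List Int) (k : Int) :
    pvNews (0 :: s) k xs = (pvNews s k xs).filter (fun iv => iv.2 != 0) := by
  induction xs generalizing s k with
  | nil => rfl
  | cons x xs ih =>
    simp only [pvNews]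
    by_cases hx0 : x = 0
    · subst hx0
      by_cases hx : (0 : Int) ∈ s
      · rw [if_pos (by simp), if_pos hx, ih]
      · rw [if_pos (by simp), if_neg hx]
        have hdrop : List.filter (fun iv : Int × Int => iv.2 != 0)
            ((k, (0:Int)) :: pvNews ((0:Int) :: s) (k+1) xs)
            = List.filter (fun iv : Int × Int => iv.2 != 0) (pvNews ((0:Int) :: s) (k+1) xs) := by
          simp
        rw [hdrop, ← ih]
        exact pvNews_congr _ _ _ _ (by intro y; simp)
    · by_cases hx : x ∈ s
      · rw [if_pos (by simp [hx]), if_pos hx, ih]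
      · rw [if_neg (by simp [hx, hx0]), if_neg hx]
        have hkeep : List.filter (fun iv : Int × Int => iv.2 != 0)
            ((k, x) :: pvNews (x :: s) (k+1) xs)
            = (k, x) :: List.filter (fun iv : Int × Int => iv.2 != 0) (pvNews (x :: s) (k+1) xs) := by
          simp [hx0]
        rw [hkeep, ← ih]
        exact congrArg _ (pvNews_congr _ _ _ _ (by intro y; simp; tauto))

theorem pvNews_index (r : List Int) : ∀ (p s : List Int),
    (∀ y, y ∈ s ↔ (y ∈ p ∨ y = 0)) →
    ∀ iv ∈ pvNews s (p.length : Int) r,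
      PySem.List.index? (p ++ r) iv.2 = some iv.1.toNat ∧ 0 ≤ iv.1 := by
  induction r with
  | nil => intro p s _ iv h; simp [pvNews] at h
  | cons x r ih =>
    intro p s hs iv hiv
    simp only [pvNews] at hiv
    by_cases hx : x ∈ s
    · rw [if_pos hx] at hiv
      have hs' : ∀ y, y ∈ s ↔ (y ∈ p ++ [x] ∨ y = 0) := by
        intro y
        rw [hs y]
        simp only [List.mem_append, List.mem_singleton]
        constructor
        · tauto
        · rintro ((h | rfl) | h)
          · exact Or.inl h
          · exact (hs _).mp hx
          · exact Or.inr h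
      have hrec := ih (p ++ [x]) s hs' iv (by
        simpa [Int.add_comm] using hiv)
      simpa using hrec
    · rw [if_neg hx] at hiv
      have hxp : x ∉ p := fun hm => hx ((hs x).mpr (Or.inl hm))
      rcases List.mem_cons.mp hiv with rfl | htail
      · refine ⟨?_, by simp⟩
        show PySem.List.index? (p ++ x :: r) x = some ((p.length : Int)).toNat
        rw [show p ++ x :: r = (p ++ [x]) ++ r by simp,
          PySem.List.index?_append_of_mem r (by simp),
          PySem.List.index?_append_singleton_self (h := hxp)]
        simp
      · have hs'' : ∀ y, y ∈ x :: s ↔ (y ∈ p ++ [x] ∨ y = 0) := by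
          intro y
          simp only [List.mem_cons, List.mem_append, hs y]
          tauto
        have hrec := ih (p ++ [x]) (x :: s) hs'' iv (by
          simpa [Int.add_comm] using htail)
        simpa using hrec

-- ===== VERDICT (by name: the statement is the Claim_ definition above) =====
theorem get_unique_indices_spec : Claim_equal_get_unique_indices := by
  intro l _
  unfold Spec_get_unique_indices get_unique_indices get_unique_indices_alt
  rw [pvA_loop]
  have hded : PySem.List.dedup l = (pvNews ([] : List Int) 0 l).map Prod.snd := by
    simpa [PySem.List.dedup] using pvB_dedup l ([] : PySem.Set Int) 0
  rw [hded]
  have hfil : ((pvNews ([] : List Int) 0 l).map Prod.snd).filter (fun v => v != 0)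
      = (pvNews ([0] : List Int) 0 l).map Prod.snd := by
    rw [pvNews_filter l [] 0, List.filter_map]
    rfl
  rw [hfil, List.map_map, List.nil_append]
  apply List.map_congr_left
  intro iv hiv
  have hidx := pvNews_index l [] [0] (by intro y; simp) iv (by simpa using hiv)
  simp only [List.nil_append] at hidx
  simp only [Function.comp]
  rw [hidx.1]
  simp
  omega
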